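-- pv_equiv track=rewrite | github.com/alexandraback/datacollection | solutions_5634697451274240_0/Python/Alastair/pan.py | f
-- ===== SOURCE A (Python) =====
-- def f(s):
--     if set(list(s))==set(["+"]):
--         return 0
--     i=0
--     while i<len(s) and s[i] == s[0]:
--         i+=1
--     sN = i*("-" if (s[0]=="+") else "+")+s[i:]
--     return f(sN)+1
-- ===== SOURCE B (Python) =====
-- def f(s):
--     # One pass over a pancake string ('+'/'-' only): each maximal run of '-'
--     # costs two flips, except a leading '-' run which costs only one.
--     flips = 0
--     prev = '+'
--     for c in s:
--         if c != '+' and c != '-':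
--             raise ValueError("not a pancake string")
--         if c == '-' and prev != '-':
--             flips += 2
--         prev = c
--     if s.startswith('-'):
--         flips -= 1
--     return flips
-- ===== Notes on version B (the rewrite author's own statement) =====
-- stated objective: simpler
-- what changed: Replaced A's recursion (rebuild the whole string after flipping the leading run, recurse until all '+') by a single left-to-right pass that counts maximal '-' runs and applies the closed-form flip count 2*runs - (1 if the string starts with '-').
-- outside the precondition, e.g. on f('a-'): A returns 3, B raises ValueError; on f('ab'): A does not finish within the time limit, B raises ValueError; on f(''): A raises IndexError, B returns 0
import Mathlib
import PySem

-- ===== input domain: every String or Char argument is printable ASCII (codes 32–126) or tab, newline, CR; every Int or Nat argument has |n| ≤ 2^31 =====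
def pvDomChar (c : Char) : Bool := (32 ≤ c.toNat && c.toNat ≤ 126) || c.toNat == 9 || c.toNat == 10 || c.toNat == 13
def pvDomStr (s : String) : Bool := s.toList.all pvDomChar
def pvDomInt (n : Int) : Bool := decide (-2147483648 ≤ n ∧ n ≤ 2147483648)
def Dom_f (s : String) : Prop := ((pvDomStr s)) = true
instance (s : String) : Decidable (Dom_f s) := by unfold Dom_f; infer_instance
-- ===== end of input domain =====

-- B replaces A's quadratic flip-the-leading-run recursion by one linear pass counting maximal '-' runs (closed-form flip count).

-- ===== PORT A =====
-- the while loop 'i=0; while i<len(s) and s[i]==s[0]: i+=1'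
def fWhile (l : List Char) (i : Nat) : Nat :=
  if i < l.length ∧ l.getD i ' ' = l.getD 0 ' ' then fWhile l (i + 1) else i
termination_by l.length - i
decreasing_by omega

-- A's recursion, with fuel only to make it total (the fuel is never exhausted inside Pre_f)
def fAux : Nat → List Char → Int
  | 0, _ => 0
  | fuel + 1, l =>
    if PySem.Set.equal (PySem.Set.ofList l) (PySem.Set.ofList ['+']) then 0
    else
      let i := fWhile l 0
      let sN := List.replicate i (if l.getD 0 ' ' = '+' then '-' else '+') ++ l.drop i
      fAux fuel sN + 1

def f (s : String) : Int := fAux (s.toList.length + 1) s.toList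

-- ===== PORT B =====
-- loop body of Source B: state some (flips, prev); none = the ValueError was raised
def bStepV (st : Option (Int × Char)) (c : Char) : Option (Int × Char) :=
  match st with
  | none => none
  | some fp =>
    if c ≠ '+' ∧ c ≠ '-' then none
    else some (if c = '-' ∧ fp.2 ≠ '-' then fp.1 + 2 else fp.1, c)

def f_alt (s : String) : Int :=
  match s.toList.foldl bStepV (some (0, '+')) with
  | none => 0  -- ValueError('not a pancake string'); unreached inside Pre_f
  | some st => if PySem.Str.startswith s "-" then st.1 - 1 else st.1

-- ===== PRECONDITION & SPEC =====
-- Pre_f excludes the empty string (A raises IndexError on s[0]) and strings containing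
-- characters other than '+'/'-' (outside the task's pancake-string domain: A's flip
-- recursion diverges on most of them, and B raises ValueError there).
def Pre_f (s : String) : Prop := s.toList ≠ [] ∧ s.toList.all (fun c => c == '+' || c == '-') = true
instance (s : String) : Decidable (Pre_f s) := by unfold Pre_f; infer_instance
def pvWitness_f : String := "+-+"

def Spec_f (s : String) (out : Int) : Prop := out = f_alt s
instance (s : String) (out : Int) : Decidable (Spec_f s out) := by unfold Spec_f; infer_instance

-- ===== CLAIM (what is proved, stated in full; the proofs are below) =====
def Claim_equal_f : Prop := ∀ (s : String), Dom_f s → Pre_f s → Spec_f s (f s)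

-- ===== LEMMAS AND PROOFS =====

-- proof-side pure loop body: bStepV on a validated pancake character
def bStep (fp : Int × Char) (c : Char) : Int × Char :=
  (if c = '-' ∧ fp.2 ≠ '-' then fp.1 + 2 else fp.1, c)

theorem foldl_bStepV_valid (l : List Char) : ∀ st, (∀ c ∈ l, c = '+' ∨ c = '-') →
    l.foldl bStepV (some st) = some (l.foldl bStep st) := by
  induction l with
  | nil => intro st _; rfl
  | cons c cs ih =>
    intro st hb
    have hc : c = '+' ∨ c = '-' := hb c (by simp)
    have hval : ¬ (c ≠ '+' ∧ c ≠ '-') := by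
      rcases hc with rfl | rfl
      · rintro ⟨h1, -⟩; exact h1 rfl
      · rintro ⟨-, h2⟩; exact h2 rfl
    simp only [List.foldl, bStepV, if_neg hval]
    exact ih _ (fun x hx => hb x (by simp [hx]))

-- B's value on lists (head? version of the startswith adjustment)
def g (l : List Char) : Int :=
  (l.foldl bStep (0, '+')).1 - (if l.head? = some '-' then 1 else 0)

-- the accumulator only shifts the result
theorem bStep_shift (L : List Char) : ∀ (a d : Int) (p : Char),
    (L.foldl bStep (a + d, p)).1 = (L.foldl bStep (a, p)).1 + d := by
  induction L with
  | nil => intro a d p; simp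
  | cons c cs ih =>
    intro a d p
    simp only [List.foldl, bStep]
    by_cases h : c = '-' ∧ p ≠ '-'
    · simp only [if_pos h]
      rw [show a + d + 2 = (a + 2) + d by ring, ih]
    · simp only [if_neg h, ih]

-- the fold from a given prev, with flips 0
def h (p : Char) (L : List Char) : Int := (L.foldl bStep (0, p)).1

theorem foldl_fst_eq_h (L : List Char) (a : Int) (p : Char) :
    (L.foldl bStep (a, p)).1 = h p L + a := by
  have := bStep_shift L 0 a p
  simpa [h] using this

theorem h_nil (p : Char) : h p [] = 0 := rfl

theorem h_cons (c : Char) (cs : List Char) (p : Char) :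
    h p (c :: cs) = h c cs + (if c = '-' ∧ p ≠ '-' then 2 else 0) := by
  simp only [h, List.foldl, bStep]
  by_cases hc : c = '-' ∧ p ≠ '-'
  · simp only [if_pos hc, foldl_fst_eq_h]; ring
  · simp only [if_neg hc, foldl_fst_eq_h]; ring

theorem h_head_minus (cs : List Char) : h '+' ('-' :: cs) = h '-' cs + 2 := by
  rw [h_cons, if_pos ⟨rfl, by decide⟩]

theorem h_cons_same (c : Char) (cs : List Char) : h c (c :: cs) = h c cs := by
  rw [h_cons, if_neg (by rintro ⟨h1, h2⟩; exact h2 h1)]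
  ring

theorem h_head_of_ne (c : Char) (cs : List Char) (hc : c ≠ '-') :
    h '+' (c :: cs) = h c cs := by
  rw [h_cons, if_neg (by rintro ⟨he, -⟩; exact hc he)]
  ring

theorem h_all_eq (L : List Char) (c : Char) (hall : ∀ x ∈ L, x = c) : h c L = 0 := by
  induction L with
  | nil => rfl
  | cons y ys ih =>
    have hy : y = c := hall y (by simp)
    subst hy
    rw [h_cons_same, ih (fun x hx => hall x (by simp [hx]))]

theorem h_nonneg (L : List Char) : ∀ p, 0 ≤ h p L := by
  induction L with
  | nil => intro p; rw [h_nil]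
  | cons c cs ih =>
    intro p
    rw [h_cons]
    have := ih c
    split_ifs <;> omega

theorem h_le (L : List Char) : ∀ p, h p L ≤ L.length + (if p = '-' then 0 else 1) := by
  induction L with
  | nil =>
    intro p
    rw [h_nil]
    split_ifs <;> simp
  | cons c cs ih =>
    intro p
    rw [h_cons]
    have hih := ih c
    simp only [List.length_cons]
    push_cast at *
    by_cases hc : c = '-'
    · rw [if_pos hc] at hih
      by_cases hp : p = '-'
      · rw [if_neg (by rintro ⟨-, hne⟩; exact hne hp), if_pos hp]
        omega
      · rw [if_pos ⟨hc, hp⟩, if_neg hp]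
        omega
    · rw [if_neg hc] at hih
      rw [if_neg (by rintro ⟨he, -⟩; exact hc he)]
      split_ifs <;> omega

theorem g_cons (c : Char) (cs : List Char) :
    g (c :: cs) = h '+' (c :: cs) - (if c = '-' then 1 else 0) := by
  unfold g h
  simp only [List.head?_cons, Option.some.injEq]

theorem g_nonneg (l : List Char) : 0 ≤ g l := by
  cases l with
  | nil => simp [g]
  | cons c cs =>
    rw [g_cons]
    by_cases hc : c = '-'
    · subst hc
      rw [h_head_minus, if_pos rfl]
      have := h_nonneg cs '-'
      omega
    · rw [if_neg hc]
      have := h_nonneg (c :: cs) '+'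
      omega

theorem g_le_length (l : List Char) (hne : l ≠ [])
    (hb : ∀ c ∈ l, c = '+' ∨ c = '-') : g l ≤ l.length := by
  cases l with
  | nil => exact absurd rfl hne
  | cons c cs =>
    rw [g_cons]
    simp only [List.length_cons]
    rcases hb c (by simp) with hc | hc <;> subst hc
    · rw [h_head_of_ne _ _ (by decide), if_neg (by decide)]
      have := h_le cs '+'
      rw [if_neg (by decide)] at this
      push_cast at *
      omega
    · rw [h_head_minus, if_pos rfl]
      have := h_le cs '-'
      rw [if_pos rfl] at this
      push_cast at *
      omega

theorem g_all_plus (l : List Char) (hall : ∀ x ∈ l, x = '+') : g l = 0 := by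
  cases l with
  | nil => simp [g]
  | cons c cs =>
    have hc : c = '+' := hall c (by simp)
    subst hc
    rw [g_cons, h_head_of_ne _ _ (by decide),
        h_all_eq cs '+' (fun x hx => hall x (by simp [hx])), if_neg (by decide)]
    ring

def pflip (c : Char) : Char := if c = '+' then '-' else '+'

theorem h_replicate_append (c : Char) (L : List Char) : ∀ (j : Nat) (p : Char),
    h p (List.replicate (j + 1) c ++ L) = h c L + (if c = '-' ∧ p ≠ '-' then 2 else 0) := by
  intro j
  induction j with
  | zero =>
    intro p
    rw [show List.replicate 1 c ++ L = c :: L by simp, h_cons]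
  | succ k ih =>
    intro p
    rw [show List.replicate (k + 1 + 1) c ++ L = c :: (List.replicate (k + 1) c ++ L) by
          simp [List.replicate_succ], h_cons, ih c]
    rw [if_neg (by rintro ⟨h1, h2⟩; exact h2 h1)]
    ring

theorem g_run (c : Char) (L : List Char) (j : Nat) :
    g (List.replicate (j + 1) c ++ L) = h c L + (if c = '-' then 1 else 0) := by
  rw [show List.replicate (j + 1) c ++ L = c :: (List.replicate j c ++ L) by
        simp [List.replicate_succ], g_cons,
      show c :: (List.replicate j c ++ L) = List.replicate (j + 1) c ++ L by
        simp [List.replicate_succ], h_replicate_append]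
  by_cases hc : c = '-'
  · rw [if_pos ⟨hc, by decide⟩, if_pos hc]; ring
  · rw [if_neg (by rintro ⟨he, -⟩; exact hc he), if_neg hc]; ring

-- the key step: flipping the leading run drops g by exactly 1 (unless the list was all '+')
theorem g_step (x : Char) (j : Nat) (rest : List Char)
    (hx : x = '+' ∨ x = '-')
    (hrest : rest = [] ∨ rest.head? = some (pflip x))
    (hnotall : ¬ (x = '+' ∧ rest = [])) :
    g (List.replicate (j + 1) x ++ rest) = g (List.replicate (j + 1) (pflip x) ++ rest) + 1 := by
  rw [g_run, g_run]
  rcases hrest with rfl | hre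
  · rcases hx with rfl | rfl
    · exact absurd ⟨rfl, rfl⟩ hnotall
    · rw [show pflip '-' = '+' by decide, h_nil, h_nil,
          if_pos rfl, if_neg (by decide)]
      ring
  · obtain ⟨y, r', rfl⟩ : ∃ a b, rest = a :: b := by
      cases rest with
      | nil => simp at hre
      | cons a b => exact ⟨a, b, rfl⟩
    have hy : y = pflip x := by simpa using hre
    subst hy
    rcases hx with rfl | rfl
    · rw [show pflip '+' = '-' by decide, h_head_minus, h_cons_same,
          if_neg (by decide), if_pos rfl]
      ring
    · rw [show pflip '-' = '+' by decide, h_cons,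
          if_neg (by rintro ⟨he, -⟩; exact absurd he (by decide)),
          h_head_of_ne _ _ (by decide), if_pos rfl, if_neg (by decide)]

-- fWhile computes the length of the leading run
theorem fWhile_spec (l : List Char) : ∀ i, i ≤ l.length →
    fWhile l i = i + ((l.drop i).takeWhile (fun c => c = l.getD 0 ' ')).length := by
  intro i
  induction hm : l.length - i using Nat.strong_induction_on generalizing i with
  | _ m ih =>
    intro hile
    rw [fWhile]
    by_cases hcond : i < l.length ∧ l.getD i ' ' = l.getD 0 ' '
    · rw [if_pos hcond]
      obtain ⟨hlt, heq⟩ := hcond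
      have step := ih (l.length - (i + 1)) (by omega) (i + 1) rfl (by omega)
      rw [step]
      have hdrop : l.drop i = l[i] :: l.drop (i + 1) := List.drop_eq_getElem_cons hlt
      have hgi : l[i] = l.getD 0 ' ' := by
        have : l[i] = l.getD i ' ' := by
          rw [List.getD_eq_getElem?_getD, List.getElem?_eq_getElem hlt]; rfl
        rw [this, heq]
      rw [hdrop, List.takeWhile_cons, if_pos (by simpa using hgi)]
      simp
      omega
    · rw [if_neg hcond]
      by_cases hlt : i < l.length
      · have hne : l.getD i ' ' ≠ l.getD 0 ' ' := fun hcc => hcond ⟨hlt, hcc⟩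
        have hdrop : l.drop i = l[i] :: l.drop (i + 1) := List.drop_eq_getElem_cons hlt
        have hgi : l[i] = l.getD i ' ' := by
          rw [List.getD_eq_getElem?_getD, List.getElem?_eq_getElem hlt]; rfl
        rw [hdrop, List.takeWhile_cons, if_neg (by simp only [hgi, decide_eq_true_eq]; exact hne)]
        simp
      · have : i = l.length := by omega
        subst this
        simp

theorem drop_takeWhile (l : List Char) (x : Char) :
    l.drop (l.takeWhile (fun c => c = x)).length = l.dropWhile (fun c => c = x) := by
  induction l with
  | nil => rfl
  | cons c cs ih =>
    by_cases hc : c = x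
    · rw [List.takeWhile_cons_of_pos (by simpa using hc),
          List.dropWhile_cons_of_pos (by simpa using hc)]
      simpa using ih
    · rw [List.takeWhile_cons_of_neg (by simpa using hc),
          List.dropWhile_cons_of_neg (by simpa using hc)]
      rfl

theorem takeWhile_eq_replicate (l : List Char) (x : Char) :
    l.takeWhile (fun c => c = x) = List.replicate (l.takeWhile (fun c => c = x)).length x := by
  rw [List.eq_replicate_iff]
  refine ⟨rfl, ?_⟩
  intro b hb
  have := List.mem_takeWhile_imp hb
  simpa using this

theorem run_head (l : List Char) (x : Char)
    (hb : ∀ c ∈ l, c = '+' ∨ c = '-') (hx : x = '+' ∨ x = '-') :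
    l.drop (l.takeWhile (fun c => c = x)).length = [] ∨
      (l.drop (l.takeWhile (fun c => c = x)).length).head? = some (pflip x) := by
  rw [drop_takeWhile]
  cases hdrop : l.dropWhile (fun c => c = x) with
  | nil => exact Or.inl rfl
  | cons y ys =>
    right
    have hyne : ¬ (y = x) := by
      have := List.head?_dropWhile_not (p := fun c => decide (c = x)) (l := l)
      rw [hdrop] at this
      simpa using this
    have hymem : y ∈ l := by
      have : y ∈ l.dropWhile (fun c => c = x) := by rw [hdrop]; simp
      exact List.dropWhile_subset _ this
    have hy := hb y hymem
    simp only [List.head?_cons, Option.some.injEq]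
    rcases hx with rfl | rfl <;> rcases hy with rfl | rfl <;> simp_all [pflip]

-- the Python-set guard is true exactly on nonempty all-'+' lists
theorem guard_iff (l : List Char) (hne : l ≠ []) :
    PySem.Set.equal (PySem.Set.ofList l) (PySem.Set.ofList ['+']) = true ↔
      ∀ x ∈ l, x = '+' := by
  rw [PySem.Set.equal_iff]
  constructor
  · intro hmem x hx
    have hx' : x ∈ PySem.Set.ofList l := by rw [PySem.Set.mem_ofList]; exact hx
    have := (hmem x).mp hx'
    simpa [PySem.Set.ofList] using this
  · intro hall x
    rw [PySem.Set.mem_ofList]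
    constructor
    · intro hx
      have := hall x hx
      simp [PySem.Set.ofList, this]
    · intro hx
      have hx' : x = '+' := by simpa [PySem.Set.ofList] using hx
      obtain ⟨c, cs, rfl⟩ : ∃ c cs, l = c :: cs := by
        cases l with
        | nil => exact absurd rfl hne
        | cons a b => exact ⟨a, b, rfl⟩
      have hc : c = '+' := hall c (by simp)
      subst hx' hc
      simp

-- main invariant: with enough fuel, A's recursion computes g
theorem fAux_eq_g : ∀ (fuel : Nat) (l : List Char), l ≠ [] →
    (∀ c ∈ l, c = '+' ∨ c = '-') → g l < fuel → fAux fuel l = g l := by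
  intro fuel
  induction fuel with
  | zero =>
    intro l _ _ hfuel
    have := g_nonneg l
    omega
  | succ n ih =>
    intro l hne hb hfuel
    obtain ⟨x, xs, rfl⟩ : ∃ c cs, l = c :: cs := by
      cases l with
      | nil => exact absurd rfl hne
      | cons a b => exact ⟨a, b, rfl⟩
    rw [fAux]
    by_cases hguard : PySem.Set.equal (PySem.Set.ofList (x :: xs)) (PySem.Set.ofList ['+']) = true
    · rw [if_pos hguard]
      exact (g_all_plus _ ((guard_iff _ hne).mp hguard)).symm
    · rw [if_neg hguard]
      have hx : x = '+' ∨ x = '-' := hb x (by simp)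
      have hgetD0 : (x :: xs).getD 0 ' ' = x := rfl
      have hi : fWhile (x :: xs) 0 = ((x :: xs).takeWhile (fun c => c = x)).length := by
        have := fWhile_spec (x :: xs) 0 (by simp)
        simpa [hgetD0] using this
      set i := ((x :: xs).takeWhile (fun c => c = x)).length with hidef
      obtain ⟨j, hj⟩ : ∃ j, i = j + 1 := by
        refine ⟨i - 1, ?_⟩
        have : 1 ≤ i := by
          rw [hidef, List.takeWhile_cons, if_pos (by simp)]
          simp
        omega
      have hflipc : (if (x :: xs).getD 0 ' ' = '+' then '-' else '+') = pflip x := by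
        rw [hgetD0]; rfl
      have hdecomp : (x :: xs) = List.replicate i x ++ (x :: xs).drop i := by
        conv_lhs => rw [← List.takeWhile_append_dropWhile (p := fun c => decide (c = x)) (l := x :: xs)]
        rw [show ((x :: xs).takeWhile fun c => decide (c = x)) =
              List.replicate i x from takeWhile_eq_replicate (x :: xs) x]
        congr 1
        rw [hidef, drop_takeWhile]
      set rest := (x :: xs).drop i with hrdef
      have hresth : rest = [] ∨ rest.head? = some (pflip x) := run_head (x :: xs) x hb hx
      have hnotall : ¬ (x = '+' ∧ rest = []) := by
        rintro ⟨rfl, hre⟩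
        apply hguard
        rw [guard_iff _ hne]
        intro c hc
        rw [hdecomp, hre, List.append_nil] at hc
        exact List.eq_of_mem_replicate hc
      have hgstep : g (x :: xs) = g (List.replicate i (pflip x) ++ rest) + 1 := by
        conv_lhs => rw [hdecomp]
        rw [hj]
        exact g_step x j rest hx hresth hnotall
      have hsne : List.replicate i (pflip x) ++ rest ≠ [] := by
        simp [hj]
      have hsb : ∀ c ∈ List.replicate i (pflip x) ++ rest, c = '+' ∨ c = '-' := by
        intro c hc
        rw [List.mem_append] at hc
        rcases hc with hc | hc
        · have := List.eq_of_mem_replicate hc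
          subst this
          rcases hx with rfl | rfl <;> simp [pflip]
        · exact hb c (by rw [hdecomp, List.mem_append]; exact Or.inr hc)
      have ihs := ih (List.replicate i (pflip x) ++ rest) hsne hsb (by omega)
      simp only [hi, hflipc, ← hrdef, ihs]
      omega

theorem g_eq_f_alt (s : String) (hb : ∀ c ∈ s.toList, c = '+' ∨ c = '-') :
    g s.toList = f_alt s := by
  unfold f_alt g
  rw [foldl_bStepV_valid s.toList (0, '+') hb]
  have hsw : PySem.Str.startswith s "-" = decide (s.toList.head? = some '-') := by
    rw [PySem.Str.startswith_eq]
    cases hl : s.toList with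
    | nil => simp [PySem.Chars.startswith]
    | cons c cs =>
      by_cases hc : c = '-'
      · subst hc; simp [PySem.Chars.startswith]
      · have hbeq : ('-' == c) = false := beq_eq_false_iff_ne.mpr (fun hcc => hc hcc.symm)
        simp [PySem.Chars.startswith, List.isPrefixOf, hbeq, hc]
  rw [hsw]
  by_cases hc : s.toList.head? = some '-' <;> simp [hc]

-- ===== VERDICT (by name: the statement is the Claim_ definition above) =====
theorem f_spec : Claim_equal_f := by
  intro s _ hpre
  obtain ⟨hne, hball⟩ := hpre
  have hb : ∀ c ∈ s.toList, c = '+' ∨ c = '-' := by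
    intro c hc
    have := List.all_eq_true.mp hball c hc
    simpa using this
  unfold Spec_f f
  rw [← g_eq_f_alt s hb]
  exact fAux_eq_g (s.toList.length + 1) s.toList hne hb
    (by have := g_le_length s.toList hne hb; omega)
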